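-- pv_equiv track=rewrite | github.com/juni8453/python_practice | inflearn/시뮬레이션/청소_로봇(ver_2).py | solution
-- ===== SOURCE A (Python) =====
-- def solution(moves):
--     answer = [0, 0]
--     dx = [0, 1, 0, -1]
--     dy = [1, 0, -1, 0]
--     dir = ['R', 'D', 'L', 'U']
--
--     for move in moves:
--         for i in range(4):
--             if move == dir[i]:
--                 answer[0] += dx[i]
--                 answer[1] += dy[i]
--     return answer
-- ===== SOURCE B (Python) =====
-- from collections import Counter
--
-- def solution(moves):
--     c = Counter(moves)
--     return [c['D'] - c['U'], c['R'] - c['L']]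
-- ===== Notes on version B (the rewrite author's own statement) =====
-- stated objective: simpler
-- what changed: Replaces the per-move 4-way scan over dx/dy/dir direction tables with a single Counter tally of the moves and a closed-form difference of the two opposite-direction counts per axis.
import Mathlib
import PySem

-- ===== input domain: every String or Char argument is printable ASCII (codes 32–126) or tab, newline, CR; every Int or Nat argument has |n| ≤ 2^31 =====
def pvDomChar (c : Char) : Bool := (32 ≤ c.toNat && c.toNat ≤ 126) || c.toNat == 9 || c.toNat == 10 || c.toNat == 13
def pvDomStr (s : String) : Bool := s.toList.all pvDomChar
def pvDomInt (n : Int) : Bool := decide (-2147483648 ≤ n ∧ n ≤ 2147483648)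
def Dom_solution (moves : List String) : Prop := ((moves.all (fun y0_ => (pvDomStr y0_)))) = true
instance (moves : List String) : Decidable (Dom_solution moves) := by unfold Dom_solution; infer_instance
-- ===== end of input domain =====

-- B replaces A's per-move scan over dx/dy/dir direction tables with one Counter tally
-- and the closed form [c['D']-c['U'], c['R']-c['L']] (objective: simpler).

-- ===== PORT A =====
-- the inner `for i in range(4)` loop body over the dx/dy/dir tables, step for step
def solutionStep (answer : Int × Int) (move : String) : Int × Int :=
  let dx : List Int := [0, 1, 0, -1]
  let dy : List Int := [1, 0, -1, 0]
  let dir : List String := ["R", "D", "L", "U"]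
  (PySem.List.pyRange 0 4 1).foldl
    (fun a i =>
      if some move = PySem.List.pyGet? dir i then
        ((a.1 + (PySem.List.pyGet? dx i).getD 0), (a.2 + (PySem.List.pyGet? dy i).getD 0))
      else a) answer

def solution (moves : List String) : List Int :=
  let answer := moves.foldl solutionStep (0, 0)
  [answer.1, answer.2]

-- ===== PORT B =====
def solution_alt (moves : List String) : List Int :=
  let c := PySem.Dict.counter moves
  [c.getD "D" 0 - c.getD "U" 0, c.getD "R" 0 - c.getD "L" 0]

-- ===== PRECONDITION & SPEC =====
def Spec_solution (moves : List String) (out : List Int) : Prop := out = solution_alt moves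
instance (moves : List String) (out : List Int) : Decidable (Spec_solution moves out) := by unfold Spec_solution; infer_instance

-- ===== CLAIM (what is proved, stated in full; the proofs are below) =====
def Claim_equal_solution : Prop := ∀ (moves : List String), Dom_solution moves → Spec_solution moves (solution moves)

-- ===== LEMMAS AND PROOFS =====

-- one pass of A's inner table scan adds the per-direction indicator deltas
theorem solutionStep_eq (a : Int × Int) (m : String) :
    solutionStep a m =
      (a.1 + ((if m = "D" then 1 else 0) - (if m = "U" then 1 else 0)),
       a.2 + ((if m = "R" then 1 else 0) - (if m = "L" then 1 else 0))) := by
  simp only [solutionStep, show PySem.List.pyRange 0 4 1 = [0,1,2,3] from by decide,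
    List.foldl_cons, List.foldl_nil]
  simp only [PySem.List.pyGet?, PySem.List.pyIdx?]
  norm_num [Option.some.injEq, eq_comm]
  by_cases hR : m = "R" <;> by_cases hD : m = "D" <;>
    by_cases hL : m = "L" <;> by_cases hU : m = "U" <;>
      simp_all

theorem solution_foldl (moves : List String) (a : Int × Int) :
    moves.foldl solutionStep a =
      (a.1 + ((moves.count "D" : Int) - (moves.count "U" : Int)),
       a.2 + ((moves.count "R" : Int) - (moves.count "L" : Int))) := by
  induction moves generalizing a with
  | nil => simp
  | cons m ms ih =>
      simp only [List.foldl_cons, ih, solutionStep_eq, List.count_cons]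
      by_cases hR : m = "R" <;> by_cases hD : m = "D" <;>
        by_cases hL : m = "L" <;> by_cases hU : m = "U" <;>
          simp_all <;> omega

-- ===== VERDICT (by name: the statement is the Claim_ definition above) =====
theorem solution_spec : Claim_equal_solution := by
  intro moves _
  unfold Spec_solution solution solution_alt
  simp [solution_foldl, PySem.Dict.getD_counter]
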